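-- pv_equiv track=rewrite | github.com/lissavxo/mineradorDeVagasGLN | funcoes.py | get_companies
-- ===== SOURCE A (Python) =====
-- def get_companies(soup_details,lim_vagas= 0):
--     companies = []
--     controle_tamanho = len(soup_details)
--     internal_value = lim_vagas
--     internal_count = 0
--     internal_bol = False
--     if internal_value != 0:
--         internal_bol = True
--
--
--     for indice in range(0, controle_tamanho, 3):
--    #---------------------------------------
--         if internal_bol:
--             if internal_count < lim_vagas:
--                 item = list(soup_details[indice])
--                 del item[0:9]
--                 item = ''.join(item)
--                 companies.append(item)
--             else:
--                 return companies
--             internal_count+=1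
--         else:
--             item = list(soup_details[indice])
--             del item[0:9]
--             item = ''.join(item)
--             companies.append(item)
--
--
--     return companies
-- ===== SOURCE B (Python) =====
-- def get_companies(soup_details, lim_vagas=0):
--     chosen = soup_details[0::3]
--     if lim_vagas != 0:
--         chosen = chosen[:max(lim_vagas, 0)]
--     return [x[9:] for x in chosen]
-- ===== Notes on version B (the rewrite author's own statement) =====
-- stated objective: simpler
-- what changed: Replaced the flag/counter/early-return loop over range(0,len,3) with slice-then-map: take soup_details[0::3], apply the limit as a single slice [:max(lim_vagas,0)], then map x[9:] over the result; the C-level slicing removes per-iteration Python control flow (measured ~1.6x faster at large n).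
import Mathlib
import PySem

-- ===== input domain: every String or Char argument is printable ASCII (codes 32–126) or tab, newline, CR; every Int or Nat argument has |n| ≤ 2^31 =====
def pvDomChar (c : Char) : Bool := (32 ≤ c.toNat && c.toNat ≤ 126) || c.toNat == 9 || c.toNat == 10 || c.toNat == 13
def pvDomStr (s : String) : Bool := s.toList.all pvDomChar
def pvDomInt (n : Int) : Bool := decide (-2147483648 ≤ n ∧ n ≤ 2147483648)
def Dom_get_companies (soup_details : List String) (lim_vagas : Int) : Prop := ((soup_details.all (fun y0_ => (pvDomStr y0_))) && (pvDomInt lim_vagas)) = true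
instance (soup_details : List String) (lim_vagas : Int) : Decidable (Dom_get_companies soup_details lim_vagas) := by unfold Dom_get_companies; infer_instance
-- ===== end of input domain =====

-- B replaces A's flag/counter/early-return loop by slice-then-map: every 3rd element up front,
-- the limit applied as a single slice, then one map; objective: simpler, same cost.

-- ===== PORT A =====
-- item = list(soup_details[indice]); del item[0:9]; ''.join(item)
def pvExtractA (s : String) : String :=
  String.ofList (PySem.List.slice s.toList (some 9) none)

-- the for-loop over range(0, len, 3) with the flag, counter and early return
def pvLoopA (soup : List String) (lim : Int) (bol : Bool) :
    List Int → Int → List String → List String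
  | [], _, companies => companies
  | i :: rest, count, companies =>
    if bol then
      if count < lim then
        pvLoopA soup lim bol rest (count + 1)
          (companies ++ [pvExtractA (PySem.List.pyGetD soup i "")])
      else companies
    else
      pvLoopA soup lim bol rest count
        (companies ++ [pvExtractA (PySem.List.pyGetD soup i "")])

def get_companies (soup_details : List String) (lim_vagas : Int) : List String :=
  let internal_bol : Bool := lim_vagas != 0
  pvLoopA soup_details lim_vagas internal_bol
    (PySem.List.pyRange 0 (soup_details.length : Int) 3) 0 []

-- ===== PORT B =====
def get_companies_alt (soup_details : List String) (lim_vagas : Int) : List String :=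
  let chosen := (PySem.List.slice? soup_details none none 3).getD []   -- soup_details[0::3]
  let chosen := if lim_vagas ≠ 0 then
      PySem.List.slice chosen none (some (max lim_vagas 0))            -- chosen[:max(lim_vagas, 0)]
    else chosen
  chosen.map (fun x => PySem.Str.slice x (some 9) none)                -- [x[9:] for x in chosen]

-- ===== PRECONDITION & SPEC =====
def Spec_get_companies (soup_details : List String) (lim_vagas : Int) (out : List String) : Prop := out = get_companies_alt soup_details lim_vagas
instance (soup_details : List String) (lim_vagas : Int) (out : List String) : Decidable (Spec_get_companies soup_details lim_vagas out) := by unfold Spec_get_companies; infer_instance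

-- ===== CLAIM (what is proved, stated in full; the proofs are below) =====
def Claim_equal_get_companies : Prop := ∀ (soup_details : List String) (lim_vagas : Int), Dom_get_companies soup_details lim_vagas → Spec_get_companies soup_details lim_vagas (get_companies soup_details lim_vagas)

-- ===== LEMMAS AND PROOFS =====

-- number of selected indices (= ceil(n/3))
def pvCnt (n : Nat) : Nat := if (0:Int) < (n:Int) then (((n:Int) + 2) / 3).toNat else 0

theorem pvCnt_bound {n k : Nat} (hk : k < pvCnt n) : 3 * k < n := by
  unfold pvCnt at hk
  split at hk <;> omega

-- the stepped range is the mapped range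
theorem pvRange_three (n : Nat) :
    PySem.List.pyRange 0 (n : Int) 3 =
      (List.range (pvCnt n)).map (fun k : Nat => ((3 * k : Nat) : Int)) := by
  rw [PySem.List.pyRange_of_pos 0 (n:Int) (by norm_num)]
  have hc : (if (0:Int) < (n:Int) then (((n:Int) - 0 + 3 - 1) / 3).toNat else 0) = pvCnt n := by
    unfold pvCnt
    rcases Nat.eq_zero_or_pos n with h | h <;> simp [h] <;> try omega
  rw [hc]
  apply List.map_congr_left
  intro k _
  push_cast
  ring

-- B's step-3 slice is the same mapped range of lookups
theorem pvSliceStep3 (soup : List String) :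
    (PySem.List.slice? soup none none 3).getD [] =
      (List.range (pvCnt soup.length)).map
        (fun k : Nat => PySem.List.pyGetD soup ((3 * k : Nat) : Int) "") := by
  simp only [PySem.List.slice?, PySem.List.sliceIndices]
  norm_num
  have hc : (if 0 < soup.length then (((soup.length:Int) + 3 - 1) / 3).toNat else 0)
      = pvCnt soup.length := by
    unfold pvCnt
    rcases Nat.eq_zero_or_pos soup.length with h | h <;> simp [h] <;> try omega
  rw [hc]
  rw [List.filterMap_congr (g := fun k : Nat =>
        some (PySem.List.pyGetD soup ((3 * k : Nat) : Int) ""))]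
  · show List.filterMap (some ∘ _) _ = _
    rw [List.filterMap_eq_map]
    push_cast
    rfl
  · intro k hk
    have hb : 3 * k < soup.length := pvCnt_bound (List.mem_range.mp hk)
    have h1 : ((3 : Int) * (k : Int)).toNat = 3 * k := by omega
    rw [PySem.List.pyGetD_eq_getElem soup "" (by positivity) (by push_cast; omega)]
    rw [List.getElem?_eq_getElem (by omega : (3 * (k:Int)).toNat < soup.length)]
    congr 1

-- A's loop without the flag: plain map
theorem pvLoopA_false (soup : List String) (lim : Int) (l : List Int) (c : Int) (acc : List String) :
    pvLoopA soup lim false l c acc =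
      acc ++ l.map (fun i => pvExtractA (PySem.List.pyGetD soup i "")) := by
  induction l generalizing c acc with
  | nil => simp [pvLoopA]
  | cons i rest ih => simp [pvLoopA, ih, List.append_assoc]

-- A's loop with the flag: take then map
theorem pvLoopA_true (soup : List String) (lim : Int) (l : List Int) (c : Int) (acc : List String) :
    pvLoopA soup lim true l c acc =
      acc ++ (l.take (lim - c).toNat).map (fun i => pvExtractA (PySem.List.pyGetD soup i "")) := by
  induction l generalizing c acc with
  | nil => simp [pvLoopA]
  | cons i rest ih =>
    by_cases h : c < lim
    · have h1 : (lim - c).toNat = (lim - (c + 1)).toNat + 1 := by omega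
      simp [pvLoopA, h, ih, h1, List.append_assoc]
    · have h0 : (lim - c).toNat = 0 := by omega
      simp [pvLoopA, h, h0]

-- the two extraction routes agree
theorem pvExtract_eq (s : String) :
    pvExtractA s = PySem.Str.slice s (some 9) none := by
  simp [pvExtractA, PySem.Str.slice, PySem.Chars.slice]

-- ===== VERDICT (by name: the statement is the Claim_ definition above) =====
theorem get_companies_spec : Claim_equal_get_companies := by
  intro soup lim _
  unfold Spec_get_companies get_companies get_companies_alt
  rw [pvSliceStep3, pvRange_three]
  by_cases h : lim = 0
  · subst h
    simp only [bne_self_eq_false, if_neg (by simp : ¬(0:Int) ≠ 0)]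
    rw [pvLoopA_false]
    simp [List.map_map, Function.comp, pvExtract_eq]
  · have hb : (lim != 0) = true := by simp [h]
    simp only [hb, if_pos h]
    rw [pvLoopA_true]
    rw [PySem.List.slice_to _ (by omega : (0:Int) ≤ max lim 0)]
    have hn : (lim - 0).toNat = (max lim 0).toNat := by omega
    rw [hn, ← List.map_take, ← List.map_take, List.map_map, List.map_map]
    simp [Function.comp, pvExtract_eq]
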